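-- pv_equiv track=rewrite | github.com/quentin-meunier/LeakageVerif | node.py | gmulInt
-- ===== SOURCE A (Python) =====
-- def gmulInt(a, b):
--     assert(a >= 0 and a < 256)
--     assert(b >= 0 and b < 256)
--     p = 0
--     for i in range(8):
--         p = (((b & 1) * 0xff) & a) ^ p
--         a = (a << 1) ^ ((((a & 0x80) >> 7) * 0xff) & 0x11b)
--         b >>= 1
--     assert(p < 256)
--     return p;
-- ===== SOURCE B (Python) =====
-- # Log/antilog tables over GF(256) (generator 3, polynomial 0x11b) replace the 8-step shift-and-xor loop.
-- _EXP = [0] * 256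
-- _LOG = [0] * 256
--
-- def _init_tables():
--     x = 1
--     for i in range(255):
--         _EXP[i] = x
--         _LOG[x] = i
--         x = (x << 1) ^ x          # multiply by the generator 3
--         if x & 0x100:
--             x ^= 0x11b
--     _EXP[255] = _EXP[0]
--
-- _init_tables()
--
-- def gmulInt(a, b):
--     assert(a >= 0 and a < 256)
--     assert(b >= 0 and b < 256)
--     if a == 0 or b == 0:
--         return 0
--     return _EXP[(_LOG[a] + _LOG[b]) % 255]
-- ===== Notes on version B (the rewrite author's own statement) =====
-- stated objective: alternative
-- what changed: Replaces the 8-iteration shift-and-XOR (Russian peasant) GF(256) multiply with precomputed log/antilog tables for generator 3 and polynomial 0x11b: gmulInt returns 0 if either operand is 0, else exp[(log[a]+log[b]) % 255].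
import Mathlib
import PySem

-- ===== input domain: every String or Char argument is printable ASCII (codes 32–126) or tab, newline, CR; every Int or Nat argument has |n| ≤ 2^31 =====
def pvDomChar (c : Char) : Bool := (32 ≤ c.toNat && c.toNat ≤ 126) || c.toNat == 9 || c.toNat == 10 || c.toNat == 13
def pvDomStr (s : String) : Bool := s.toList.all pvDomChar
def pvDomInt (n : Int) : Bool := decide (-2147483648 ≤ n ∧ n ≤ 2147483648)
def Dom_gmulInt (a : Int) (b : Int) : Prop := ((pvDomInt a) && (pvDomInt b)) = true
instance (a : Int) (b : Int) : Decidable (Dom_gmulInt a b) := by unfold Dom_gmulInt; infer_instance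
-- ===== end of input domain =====

-- B replaces A's 8-step shift-and-xor loop by GF(256) log/antilog tables (generator 3, poly 0x11b); objective: idiomatic table-based multiply.

-- B replaces A's 8-step shift-and-xor loop with GF(256) log/antilog tables (generator 3, poly 0x11b); objective: alternative table-based algorithm.

-- ===== PORT A =====
-- the loop body of A, over the state (p, a, b)
def pvStepA (s : Int × Int × Int) (_ : Nat) : Int × Int × Int :=
  (PySem.Int.bxor (PySem.Int.band ((PySem.Int.band s.2.2 1) * 0xff) s.2.1) s.1,
   PySem.Int.bxor (s.2.1 <<< (1 : Nat)) (PySem.Int.band (((PySem.Int.band s.2.1 0x80) >>> (7 : Nat)) * 0xff) 0x11b),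
   s.2.2 >>> (1 : Nat))

def gmulInt (a : Int) (b : Int) : Int :=
  ((List.range 8).foldl pvStepA (0, a, b)).1

-- ===== PORT B =====
-- port of Source B's module-level table construction: state (_EXP, _LOG, x)
def pvGfTables : List Int × List Int :=
  let s := (List.range 255).foldl (fun (s : List Int × List Int × Int) i =>
    let e := s.1.set i s.2.2
    let l := s.2.1.set s.2.2.toNat (i : Int)
    let x := PySem.Int.bxor (s.2.2 <<< (1 : Nat)) s.2.2
    let x := if PySem.Int.band x 0x100 ≠ 0 then PySem.Int.bxor x 0x11b else x
    (e, l, x)) (List.replicate 256 (0 : Int), List.replicate 256 (0 : Int), 1)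
  (s.1.set 255 (s.1.getD 0 0), s.2.1)

def gmulInt_alt (a : Int) (b : Int) : Int :=
  if a = 0 ∨ b = 0 then 0
  else pvGfTables.1.getD (((pvGfTables.2.getD a.toNat 0 + pvGfTables.2.getD b.toNat 0) % 255).toNat) 0

-- ===== PRECONDITION & SPEC =====
-- Pre_: exactly the inputs A's two asserts accept (outside, A raises AssertionError)
def Pre_gmulInt (a : Int) (b : Int) : Prop := 0 ≤ a ∧ a < 256 ∧ 0 ≤ b ∧ b < 256
instance (a : Int) (b : Int) : Decidable (Pre_gmulInt a b) := by unfold Pre_gmulInt; infer_instance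
def pvWitness_gmulInt : Int × Int := (87, 131)

def Spec_gmulInt (a : Int) (b : Int) (out : Int) : Prop := out = gmulInt_alt a b
instance (a : Int) (b : Int) (out : Int) : Decidable (Spec_gmulInt a b out) := by unfold Spec_gmulInt; infer_instance

-- ===== CLAIM (what is proved, stated in full; the proofs are below) =====
def Claim_equal_gmulInt : Prop := ∀ (a : Int) (b : Int), Dom_gmulInt a b → Pre_gmulInt a b → Spec_gmulInt a b (gmulInt a b)

-- ===== LEMMAS AND PROOFS =====
-- Nat mirror of A's loop body / loop (used only in the proof)
def pvStepN (s : Nat × Nat × Nat) (_ : Nat) : Nat × Nat × Nat :=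
  ((((s.2.2 &&& 1) * 255) &&& s.2.1) ^^^ s.1,
   (s.2.1 <<< 1) ^^^ ((((s.2.1 &&& 128) >>> 7) * 255) &&& 283),
   s.2.2 >>> 1)
def pvGmulN (a b : Nat) : Nat := ((List.range 8).foldl pvStepN (0, a, b)).1

-- flat unrolled form of the same loop (definitionally equal; evaluates far faster)
def pvXt (x : Nat) : Nat := (x <<< 1) ^^^ ((((x &&& 128) >>> 7) * 255) &&& 283)
def pvGmulC (a b : Nat) : Nat :=
  (((((((((((b >>> 1) >>> 1) >>> 1) >>> 1) >>> 1) >>> 1) >>> 1) &&& 1) * 255) &&& pvXt (pvXt (pvXt (pvXt (pvXt (pvXt (pvXt a))))))) ^^^ ((((((((((b >>> 1) >>> 1) >>> 1) >>> 1) >>> 1) >>> 1) &&& 1) * 255) &&& pvXt (pvXt (pvXt (pvXt (pvXt (pvXt a)))))) ^^^ (((((((((b >>> 1) >>> 1) >>> 1) >>> 1) >>> 1) &&& 1) * 255) &&& pvXt (pvXt (pvXt (pvXt (pvXt a))))) ^^^ ((((((((b >>> 1) >>> 1) >>> 1) >>> 1) &&& 1) * 255) &&& pvXt (pvXt (pvXt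 (pvXt a)))) ^^^ (((((((b >>> 1) >>> 1) >>> 1) &&& 1) * 255) &&& pvXt (pvXt (pvXt a))) ^^^ ((((((b >>> 1) >>> 1) &&& 1) * 255) &&& pvXt (pvXt a)) ^^^ (((((b >>> 1) &&& 1) * 255) &&& pvXt a) ^^^ ((((b &&& 1) * 255) &&& a) ^^^ 0))))))))

lemma pvGmul_unroll (a b : Nat) : pvGmulN a b = pvGmulC a b := rfl

-- the two tables packed into one Nat each (byte i = table[i]; proof-side only)
def pvExpNat : Nat := 247704880781559356684414323119999879637317647180040216102211349143305888774923398537951341803642731683984666991564019150676315804531779449815159115664189418245566988781254625896260912026622159780553349108386186142268315007856282091988200171439146255715840100601167723801170608095743514940052926055042184507632911811387723359914440662207451538163404716729158929845121383729837235901114109841630616474463024741216292666125260571984924724184385554713500007113061044175325657975136216706165622836048350080632971744177780693200859426168487707538171671676645432511882666690861394815764438377708986394032816479809277592321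
def pvLogNat : Nat := 939374623831894136699086600277250597547650664638770418422125146541797353646788332867483593573384618611044815625336497665827114626705134492515730415652478061620339993830966980270842846318821775850471098591710629241171812800746666233448222972174585295916389942636813666312872914849454985560152530477328703759683306625234997237483834721220409437442253146756845415190424543171129629468776480674528486868811725071010351012234056630775688111116293610821126543142160426617079940511630006820862697466582575257349116925728488930366609138264019883664906661504235885380294353134295748489096855100647154935187045898006656778240
def pvExpByte (i : Nat) : Nat := (pvExpNat >>> (8*i)) &&& 255
def pvLogByte (i : Nat) : Nat := (pvLogNat >>> (8*i)) &&& 255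
def pvAltN (a b : Nat) : Nat :=
  if a = 0 ∨ b = 0 then 0 else pvExpByte ((pvLogByte a + pvLogByte b) % 255)

def pvExpLit : List Int := [1, 3, 5, 15, 17, 51, 85, 255, 26, 46, 114, 150, 161, 248, 19, 53, 95, 225, 56, 72, 216, 115, 149, 164, 247, 2, 6, 10, 30, 34, 102, 170, 229, 52, 92, 228, 55, 89, 235, 38, 106, 190, 217, 112, 144, 171, 230, 49, 83, 245, 4, 12, 20, 60, 68, 204, 79, 209, 104, 184, 211, 110, 178, 205, 76, 212, 103, 169, 224, 59, 77, 215, 98, 166, 241, 8, 24, 40, 120, 136, 131, 158, 185, 208, 107, 189, 220, 127, 129, 152, 179, 206, 73, 219, 118, 154, 181, 196, 87, 249, 16, 48, 80, 240, 11, 29, 39, 105, 187, 214, 97, 163, 254, 25, 43, 125, 135, 146, 173, 236, 47, 113, 147, 174, 233, 32, 96, 160, 251, 22, 58, 78, 210, 109, 183, 194, 93, 231, 50, 86, 250, 21, 63, 65, 195, 94, 226, 61, 71, 201, 64, 192, 91, 237, 44, 116, 156, 191, 218, 117, 159, 186, 213, 100, 172, 239, 42, 126, 130, 157, 188, 223,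 122, 142, 137, 128, 155, 182, 193, 88, 232, 35, 101, 175, 234, 37, 111, 177, 200, 67, 197, 84, 252, 31, 33, 99, 165, 244, 7, 9, 27, 45, 119, 153, 176, 203, 70, 202, 69, 207, 74, 222, 121, 139, 134, 145, 168, 227, 62, 66, 198, 81, 243, 14, 18, 54, 90, 238, 41, 123, 141, 140, 143, 138, 133, 148, 167, 242, 13, 23, 57, 75, 221, 124, 132, 151, 162, 253, 28, 36, 108, 180, 199, 82, 246, 1]
def pvLogLit : List Int := [0, 0, 25, 1, 50, 2, 26, 198, 75, 199, 27, 104, 51, 238, 223, 3, 100, 4, 224, 14, 52, 141, 129, 239, 76, 113, 8, 200, 248, 105, 28, 193, 125, 194, 29, 181, 249, 185, 39, 106, 77, 228, 166, 114, 154, 201, 9, 120, 101, 47, 138, 5, 33, 15, 225, 36, 18, 240, 130, 69, 53, 147, 218, 142, 150, 143, 219, 189, 54, 208, 206, 148, 19, 92, 210, 241, 64, 70, 131, 56, 102, 221, 253, 48, 191, 6, 139, 98, 179, 37, 226, 152, 34, 136, 145, 16, 126, 110, 72, 195, 163, 182, 30, 66, 58, 107, 40, 84, 250, 133, 61, 186,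 43, 121, 10, 21, 155, 159, 94, 202, 78, 212, 172, 229, 243, 115, 167, 87, 175, 88, 168, 80, 244, 234, 214, 116, 79, 174, 233, 213, 231, 230, 173, 232, 44, 215, 117, 122, 235, 22, 11, 245, 89, 203, 95, 176, 156, 169, 81, 160, 127, 12, 246, 111, 23, 196, 73, 236, 216, 67, 31, 45, 164, 118, 123, 183, 204, 187, 62, 90, 251, 96, 177, 134, 59, 82, 161, 108, 170, 85, 41, 157, 151, 178, 135, 144, 97, 190, 220, 252, 188, 149, 207, 205, 55, 63, 91, 209, 83, 57, 132, 60, 65, 162, 109, 71, 20, 42, 158, 93, 86, 242, 211, 171, 68, 17, 146, 217, 35, 32, 46, 137, 180, 124, 184, 38, 119, 153, 227, 165, 103, 74, 237, 222, 197, 49, 254, 24, 13, 99, 140, 128, 192, 247, 112, 7]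

set_option maxRecDepth 100000 in
set_option maxHeartbeats 2000000 in
lemma tables_eq : pvGfTables = (pvExpLit, pvLogLit) := by decide

set_option maxRecDepth 100000 in
set_option maxHeartbeats 1000000 in
lemma pvExpBool :
    ((List.range 256).all fun i => pvExpLit.getD i 0 == ((pvExpByte i : Nat) : Int)) = true := by decide

set_option maxRecDepth 100000 in
set_option maxHeartbeats 1000000 in
lemma pvLogBool :
    ((List.range 256).all fun i => pvLogLit.getD i 0 == ((pvLogByte i : Nat) : Int)) = true := by decide

set_option maxRecDepth 100000 in
set_option maxHeartbeats 4000000 in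
lemma pvMainBool :
    ((List.range 256).all fun a => (List.range 256).all fun b => pvGmulC a b == pvAltN a b) = true := by decide

set_option maxHeartbeats 2000000 in
lemma exp_lookup (i : Nat) (h : i < 256) : pvGfTables.1.getD i 0 = ((pvExpByte i : Nat) : Int) := by
  rw [tables_eq]
  have := pvExpBool
  rw [List.all_eq_true] at this
  exact eq_of_beq (this i (List.mem_range.mpr h))

set_option maxHeartbeats 2000000 in
lemma log_lookup (i : Nat) (h : i < 256) : pvGfTables.2.getD i 0 = ((pvLogByte i : Nat) : Int) := by
  rw [tables_eq]
  have := pvLogBool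
  rw [List.all_eq_true] at this
  exact eq_of_beq (this i (List.mem_range.mpr h))

lemma nat_eq (a : Nat) (ha : a < 256) (b : Nat) (hb : b < 256) : pvGmulN a b = pvAltN a b := by
  have := pvMainBool
  rw [List.all_eq_true] at this
  have h2 := this a (List.mem_range.mpr ha)
  rw [List.all_eq_true] at h2
  rw [pvGmul_unroll]
  exact eq_of_beq (h2 b (List.mem_range.mpr hb))

set_option maxRecDepth 10000 in
lemma stepA_cast (p a b : Nat) (n : Nat) :
    pvStepA ((p : Int), (a : Int), (b : Int)) n =
      (((pvStepN (p, a, b) n).1 : Int), ((pvStepN (p, a, b) n).2.1 : Int), ((pvStepN (p, a, b) n).2.2 : Int)) := by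
  simp only [pvStepA, pvStepN]
  refine Prod.ext ?_ (Prod.ext ?_ ?_)
  · have g1 : PySem.Int.band (b : Int) 1 = ((b &&& 1 : Nat) : Int) := by
      simpa using PySem.Int.band_natCast b 1
    have g2 : (((b &&& 1 : Nat) : Int)) * (255 : Int) = (((b &&& 1) * 255 : Nat) : Int) := by
      push_cast; ring
    have g3 : PySem.Int.band ((((b &&& 1) * 255 : Nat) : Int)) (a : Int) = ((((b &&& 1) * 255) &&& a : Nat) : Int) :=
      PySem.Int.band_natCast _ _
    simp only [g1, g2, g3, PySem.Int.bxor_natCast]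
  · have h1 : PySem.Int.band (a : Int) 0x80 = ((a &&& 0x80 : Nat) : Int) := by
      simpa using PySem.Int.band_natCast a 0x80
    have h2 : ((a : Int) <<< (1 : Nat)) = ((a <<< 1 : Nat) : Int) := by simp
    have h3 : (((a &&& 0x80 : Nat) : Int) >>> (7 : Nat)) = (((a &&& 0x80) >>> 7 : Nat) : Int) := by simp
    have h4a : ((((a &&& 0x80) >>> 7 : Nat) : Int)) * (255 : Int) = ((((a &&& 0x80) >>> 7) * 255 : Nat) : Int) := by
      push_cast; ring
    have h4 : PySem.Int.band ((((a &&& 0x80) >>> 7) * 255 : Nat) : Int) (283 : Int)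
        = ((((a &&& 0x80) >>> 7) * 255 &&& 283 : Nat) : Int) := by
      simpa using PySem.Int.band_natCast (((a &&& 0x80) >>> 7) * 255) 283
    simp only [h1, h3, h4a, h4, h2, PySem.Int.bxor_natCast]
  · simp

lemma foldA_cast (l : List Nat) (p a b : Nat) :
    l.foldl pvStepA ((p : Int), (a : Int), (b : Int)) =
      (((l.foldl pvStepN (p, a, b)).1 : Int), ((l.foldl pvStepN (p, a, b)).2.1 : Int), ((l.foldl pvStepN (p, a, b)).2.2 : Int)) := by
  induction l generalizing p a b with
  | nil => rfl
  | cons hd tl ih =>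
      simp only [List.foldl_cons, stepA_cast]
      exact ih _ _ _

lemma gmul_cast (a b : Nat) : gmulInt (a : Int) (b : Int) = ((pvGmulN a b : Nat) : Int) := by
  unfold gmulInt pvGmulN
  have := foldA_cast (List.range 8) 0 a b
  simp only [Nat.cast_zero] at this
  rw [this]

lemma alt_cast (a b : Int) (ha0 : 0 ≤ a) (ha : a < 256) (hb0 : 0 ≤ b) (hb : b < 256) :
    gmulInt_alt a b = ((pvAltN a.toNat b.toNat : Nat) : Int) := by
  unfold gmulInt_alt pvAltN
  by_cases hz : a = 0 ∨ b = 0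
  · have hz' : a.toNat = 0 ∨ b.toNat = 0 := by omega
    rw [if_pos hz, if_pos hz']
    simp
  · have hz' : ¬ (a.toNat = 0 ∨ b.toNat = 0) := by omega
    rw [if_neg hz, if_neg hz']
    rw [log_lookup a.toNat (by omega), log_lookup b.toNat (by omega)]
    have hsum : (((pvLogByte a.toNat : Nat) : Int) + ((pvLogByte b.toNat : Nat) : Int)) % 255
        = (((pvLogByte a.toNat + pvLogByte b.toNat) % 255 : Nat) : Int) := by
      omega
    rw [hsum, Int.toNat_natCast]
    exact exp_lookup _ (by
      have := Nat.mod_lt (pvLogByte a.toNat + pvLogByte b.toNat) (y := 255) (by norm_num)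
      omega)

-- ===== VERDICT (by name: the statement is the Claim_ definition above) =====
theorem gmulInt_spec : Claim_equal_gmulInt := by
  intro a b _ hpre
  obtain ⟨ha0, ha, hb0, hb⟩ := hpre
  unfold Spec_gmulInt
  have hA : gmulInt a b = ((pvGmulN a.toNat b.toNat : Nat) : Int) := by
    have := gmul_cast a.toNat b.toNat
    rwa [Int.toNat_of_nonneg ha0, Int.toNat_of_nonneg hb0] at this
  rw [hA, nat_eq a.toNat (by omega) b.toNat (by omega),
      alt_cast a b ha0 ha hb0 hb]
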